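-- pv_equiv track=rewrite | github.com/apoca909/entity_ner | utils.py | gold_pred
-- ===== SOURCE A (Python) =====
-- def gold_pred(toks, golds, preds):
--     assert len(toks) == len(golds) == len(preds)
--     token_gold_pred = [('', 'O', 'O')] + [i for i in zip(toks, golds, preds)] + [('', 'O', 'O')]
--     size = len(token_gold_pred)
--     raw_str = ''
--
--     for k in range(1, size):
--         cur = token_gold_pred[k]
--         prev = token_gold_pred[k - 1]
--         if prev[1:3] == cur[1:3]:
--             raw_str += cur[0]
--         elif prev[1:3] != cur[1:3]:
--             if prev[1:3] == ('O', 'O'):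
--                 raw_str += '' + cur[0]      #' ' + cur[0]
--             elif prev[1:3] != ('O', 'O'):
--                     raw_str += '/' + prev[1] + '/' + prev[2] + '' + cur[0]  #'/' + prev[1] + '/' + prev[2] + ' ' + cur[0]
--
--     return raw_str.strip()
-- ===== SOURCE B (Python) =====
-- def gold_pred(toks, golds, preds):
--     assert len(toks) == len(golds) == len(preds)
--     items = list(zip(toks, golds, preds))
--     n = len(items)
--     out = []
--     i = 0
--     while i < n:
--         g, p = items[i][1], items[i][2]
--         j = i
--         while j < n and items[j][1] == g and items[j][2] == p:
--             j += 1
--         out.append(''.join(t for t, _, _ in items[i:j]))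
--         if (g, p) != ('O', 'O'):
--             out.append('/' + g + '/' + p)
--         i = j
--     return ''.join(out).strip()
-- ===== Notes on version B (the rewrite author's own statement) =====
-- stated objective: alternative
-- what changed: B replaces A's index-based scan over sentinel-padded adjacent pairs with a run-partitioning pass: it splits the zipped tokens into maximal runs of equal (gold,pred) tags, joins each run's tokens and appends one '/gold/pred' marker per non-O run.
import Mathlib
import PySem

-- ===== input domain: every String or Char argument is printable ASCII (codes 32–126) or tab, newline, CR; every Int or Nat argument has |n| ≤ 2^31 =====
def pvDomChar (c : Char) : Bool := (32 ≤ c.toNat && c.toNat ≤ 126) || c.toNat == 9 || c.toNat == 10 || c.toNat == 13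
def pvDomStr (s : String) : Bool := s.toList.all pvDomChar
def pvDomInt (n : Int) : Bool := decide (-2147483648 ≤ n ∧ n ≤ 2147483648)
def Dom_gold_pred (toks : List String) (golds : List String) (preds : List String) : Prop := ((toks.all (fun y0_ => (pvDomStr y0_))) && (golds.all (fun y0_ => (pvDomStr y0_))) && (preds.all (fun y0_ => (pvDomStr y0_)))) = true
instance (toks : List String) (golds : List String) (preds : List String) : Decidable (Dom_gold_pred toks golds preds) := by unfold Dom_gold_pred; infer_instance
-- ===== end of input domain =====

-- B partitions the zipped tokens into maximal runs of equal (gold,pred) tag pairs instead of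
-- A's sentinel-padded adjacent-pair scan; same output, same cost (objective: alternative).

-- ===== PORT A =====
def gold_pred (toks : List String) (golds : List String) (preds : List String) : String :=
  let token_gold_pred : List (String × String × String) :=
    [("", "O", "O")] ++ toks.zip (golds.zip preds) ++ [("", "O", "O")]
  let size : Int := (token_gold_pred.length : Int)
  let raw_str : String :=
    (PySem.List.pyRange 1 size 1).foldl (fun raw_str k =>
      let cur := PySem.List.pyGetD token_gold_pred k ("", "O", "O")
      let prev := PySem.List.pyGetD token_gold_pred (k - 1) ("", "O", "O")
      if prev.2 = cur.2 then raw_str ++ cur.1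
      else if prev.2 = ("O", "O") then raw_str ++ "" ++ cur.1
      else raw_str ++ "/" ++ prev.2.1 ++ "/" ++ prev.2.2 ++ "" ++ cur.1) ""
  PySem.Str.strip raw_str

-- ===== PORT B =====
-- inner while-loop of Source B = splitting off the maximal run with the head's tag pair
def gpRuns : List (String × String × String) → String
  | [] => ""
  | (t, gp) :: rest =>
    let run := rest.takeWhile (fun x => decide (x.2 = gp))
    let text := t ++ String.join (run.map (·.1))
    (if gp = ("O", "O") then text else text ++ "/" ++ gp.1 ++ "/" ++ gp.2)
      ++ gpRuns (rest.dropWhile (fun x => decide (x.2 = gp)))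
termination_by l => l.length
decreasing_by
  simp only [List.length_cons]
  exact Nat.lt_succ_of_le (List.length_dropWhile_le _ _)

def gold_pred_alt (toks : List String) (golds : List String) (preds : List String) : String :=
  PySem.Str.strip (gpRuns (toks.zip (golds.zip preds)))

-- ===== PRECONDITION & SPEC =====
-- Pre_ excludes inputs of unequal lengths, on which A's assert raises AssertionError.
def Pre_gold_pred (toks : List String) (golds : List String) (preds : List String) : Prop :=
  toks.length = golds.length ∧ golds.length = preds.length
instance (toks : List String) (golds : List String) (preds : List String) : Decidable (Pre_gold_pred toks golds preds) := by unfold Pre_gold_pred; infer_instance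
def pvWitness_gold_pred : List String × List String × List String :=
  (["New", "York", "is"], ["B", "I", "O"], ["B", "B", "O"])

def Spec_gold_pred (toks : List String) (golds : List String) (preds : List String) (out : String) : Prop := out = gold_pred_alt toks golds preds
instance (toks : List String) (golds : List String) (preds : List String) (out : String) : Decidable (Spec_gold_pred toks golds preds out) := by unfold Spec_gold_pred; infer_instance

-- ===== CLAIM (what is proved, stated in full; the proofs are below) =====
def Claim_equal_gold_pred : Prop := ∀ (toks : List String) (golds : List String) (preds : List String), Dom_gold_pred toks golds preds → Pre_gold_pred toks golds preds → Spec_gold_pred toks golds preds (gold_pred toks golds preds)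

-- ===== LEMMAS AND PROOFS =====

-- what A's loop body appends for one (prev-tags, current-triple) step
def stepT (q : String × String) (cur : String × String × String) : String :=
  if q = cur.2 then cur.1
  else if q = ("O", "O") then "" ++ cur.1
  else "/" ++ q.1 ++ "/" ++ q.2 ++ "" ++ cur.1

-- what A's loop appends over the rest of the list (final sentinel built in)
def emitT (q : String × String) : List (String × String × String) → String
  | [] => stepT q ("", "O", "O")
  | x :: rest => stepT q x ++ emitT x.2 rest

def fstep (acc : String) (cur prev : String × String × String) : String :=
  if prev.2 = cur.2 then acc ++ cur.1
  else if prev.2 = ("O", "O") then acc ++ "" ++ cur.1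
  else acc ++ "/" ++ prev.2.1 ++ "/" ++ prev.2.2 ++ "" ++ cur.1

def foldAux (s : String) (prev : String × String × String) :
    List (String × String × String) → String
  | [] => s
  | c :: rest => foldAux (fstep s c prev) c rest

theorem natfold {T S : Type} (f : S → T → T → S) (d : T) :
    ∀ (L : List T) (s : S),
      (List.range (L.length - 1)).foldl (fun acc j => f acc (L.getD (j + 1) d) (L.getD j d)) s
        = (L.zip L.tail).foldl (fun acc pc => f acc pc.2 pc.1) s := by
  intro L
  induction L with
  | nil => intro s; simp
  | cons x xs ih =>
      intro s
      cases xs with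
      | nil => simp
      | cons y ys =>
          simp only [List.length_cons, Nat.add_sub_cancel, List.range_succ_eq_map,
            List.foldl_cons, List.foldl_map, List.getD_cons_succ, List.getD_cons_zero,
            List.zip_cons_cons, List.tail_cons]
          have h := ih (f s y x)
          simp only [List.length_cons, Nat.add_sub_cancel, List.tail_cons] at h
          exact h

theorem foldl_pyRange_adj {T S : Type} (L : List T) (d : T) (f : S → T → T → S) (s : S) :
    (PySem.List.pyRange 1 (L.length : Int) 1).foldl
        (fun acc k => f acc (PySem.List.pyGetD L k d) (PySem.List.pyGetD L (k - 1) d)) s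
      = (L.zip L.tail).foldl (fun acc pc => f acc pc.2 pc.1) s := by
  have hlen : (((L.length : Int)) - 1).toNat = L.length - 1 := by omega
  rw [PySem.List.pyRange_one, List.foldl_map, hlen]
  have hf : (fun (acc : S) (k : Nat) =>
      f acc (PySem.List.pyGetD L (1 + (k : Int)) d) (PySem.List.pyGetD L (1 + (k : Int) - 1) d))
      = fun (acc : S) (k : Nat) => f acc (L.getD (k + 1) d) (L.getD k d) := by
    funext acc k
    have h1 : (1 + (k : Int)) = ((k + 1 : Nat) : Int) := by push_cast; ring
    have h2 : (((k + 1 : Nat) : Int) - 1) = ((k : Nat) : Int) := by push_cast; ring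
    rw [h1, h2, PySem.List.pyGetD_natCast, PySem.List.pyGetD_natCast]
  rw [hf]
  exact natfold f d L s

theorem zip_foldAux :
    ∀ (rest : List (String × String × String)) (prev : String × String × String) (s : String),
      ((prev :: rest).zip rest).foldl (fun acc pc => fstep acc pc.2 pc.1) s = foldAux s prev rest := by
  intro rest
  induction rest with
  | nil => intro prev s; simp [foldAux]
  | cons c rs ih =>
      intro prev s
      rw [List.zip_cons_cons, List.foldl_cons]
      exact ih c _

theorem fstep_eq (acc : String) (cur prev : String × String × String) :
    fstep acc cur prev = acc ++ stepT prev.2 cur := by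
  unfold fstep stepT
  split_ifs <;> simp [String.append_assoc]

theorem foldAux_emit :
    ∀ (M : List (String × String × String)) (prev : String × String × String) (s : String),
      foldAux s prev (M ++ [("", "O", "O")]) = s ++ emitT prev.2 M := by
  intro M
  induction M with
  | nil => intro prev s; simp [foldAux, emitT, fstep_eq]
  | cons x xs ih =>
      intro prev s
      simp only [List.cons_append, foldAux, ih, fstep_eq, emitT, String.append_assoc]

theorem foldl_append_pull :
    ∀ (l : List String) (a b : String),
      List.foldl (fun r s => r ++ s) (a ++ b) l = a ++ List.foldl (fun r s => r ++ s) b l := by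
  intro l
  induction l with
  | nil => intro a b; simp
  | cons c cs ih =>
      intro a b
      simp only [List.foldl_cons, String.append_assoc, ih]

theorem join_cons (a : String) (l : List String) :
    String.join (a :: l) = a ++ String.join l := by
  show List.foldl (fun r s => r ++ s) ("" ++ a) l = a ++ List.foldl (fun r s => r ++ s) "" l
  rw [show ("" ++ a) = (a ++ "") by simp, foldl_append_pull]

theorem join_nil : String.join ([] : List String) = "" := rfl

theorem emit_gpRuns :
    ∀ (M : List (String × String × String)) (q : String × String),
      emitT q M
        = String.join ((M.takeWhile (fun x => decide (x.2 = q))).map (·.1))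
          ++ (if q = ("O", "O") then "" else "/" ++ q.1 ++ "/" ++ q.2)
          ++ gpRuns (M.dropWhile (fun x => decide (x.2 = q))) := by
  intro M
  induction M with
  | nil =>
      intro q
      simp only [emitT, stepT, List.takeWhile_nil, List.dropWhile_nil, List.map_nil,
        join_nil, gpRuns]
      split_ifs <;> simp_all
  | cons x xs ih =>
      intro q
      obtain ⟨t, xq⟩ := x
      by_cases h : xq = q
      · subst h
        rw [List.takeWhile_cons_of_pos (by simp), List.dropWhile_cons_of_pos (by simp)]
        simp only [emitT, stepT]
        rw [List.map_cons, join_cons, ih xq]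
        simp [String.append_assoc]
      · rw [List.takeWhile_cons_of_neg (by simp [h]), List.dropWhile_cons_of_neg (by simp [h])]
        simp only [emitT, stepT, List.map_nil, join_nil]
        rw [if_neg (by simp [Ne.symm h]), ih xq, gpRuns]
        split_ifs <;> simp [String.append_assoc]

theorem emit_top (M : List (String × String × String)) :
    emitT ("O", "O") M = gpRuns M := by
  rw [emit_gpRuns, if_pos rfl]
  cases M with
  | nil => simp [gpRuns, join_nil]
  | cons x xs =>
      obtain ⟨t, xq⟩ := x
      by_cases h : xq = ("O", "O")
      · subst h
        rw [List.takeWhile_cons_of_pos (by simp), List.dropWhile_cons_of_pos (by simp),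
          List.map_cons, join_cons]
        conv_rhs => rw [gpRuns]
        simp [String.append_assoc]
      · rw [List.takeWhile_cons_of_neg (by simp [h]), List.dropWhile_cons_of_neg (by simp [h]),
          List.map_nil, join_nil]
        simp

theorem A_eq (toks golds preds : List String) :
    gold_pred toks golds preds = gold_pred_alt toks golds preds := by
  show PySem.Str.strip
      ((PySem.List.pyRange 1
          ((([("", "O", "O")] ++ toks.zip (golds.zip preds) ++ [("", "O", "O")]).length : Int)) 1).foldl
        (fun acc k =>
          fstep acc
            (PySem.List.pyGetD ([("", "O", "O")] ++ toks.zip (golds.zip preds) ++ [("", "O", "O")]) k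
              ("", "O", "O"))
            (PySem.List.pyGetD ([("", "O", "O")] ++ toks.zip (golds.zip preds) ++ [("", "O", "O")]) (k - 1)
              ("", "O", "O"))) "")
      = PySem.Str.strip (gpRuns (toks.zip (golds.zip preds)))
  rw [foldl_pyRange_adj]
  have hcons : ([("", "O", "O")] ++ toks.zip (golds.zip preds) ++ [("", "O", "O")])
      = ("", "O", "O") :: (toks.zip (golds.zip preds) ++ [("", "O", "O")]) := by simp
  rw [hcons, List.tail_cons, zip_foldAux, foldAux_emit]
  have : (("", "O", "O") : String × String × String).2 = ("O", "O") := rfl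
  rw [this, emit_top]
  simp

-- ===== VERDICT (by name: the statement is the Claim_ definition above) =====
theorem gold_pred_spec : Claim_equal_gold_pred := by
  intro toks golds preds _ _
  exact A_eq toks golds preds
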